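-- pv_equiv track=rewrite | github.com/qsebso/valorant-stats-analysis | src/event_categorizer.py | categorize_match_stage
-- ===== SOURCE A (Python) =====
-- from typing import Dict, List, Any, Optional
--
-- def categorize_match_stage(bracket_stage: str) -> Dict[str, str]:
--     """
--     Categorize a match based on its bracket stage.
--     Returns a dict with 'phase' and 'importance' classifications.
--     """
--     if not bracket_stage:
--         return {"phase": "Unknown", "importance": "Unknown"}
--
--     stage_lower = bracket_stage.lower()
--
--     # Phase categorization
--     phase = "Unknown"
--     if "group" in stage_lower or "swiss" in stage_lower:
--         phase = "Group Stage"
--     elif "playoff" in stage_lower or "bracket" in stage_lower: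
--         phase = "Playoffs"
--     elif "final" in stage_lower:
--         phase = "Finals"
--     elif "semi" in stage_lower:
--         phase = "Semifinals"
--     elif "quarter" in stage_lower:
--         phase = "Quarterfinals"
--     elif "round" in stage_lower:
--         phase = "Round Robin"
--     elif "qualifier" in stage_lower:
--         phase = "Qualifier"
--     elif "upper" in stage_lower:
--         phase = "Upper Bracket"
--     elif "lower" in stage_lower:
--         phase = "Lower Bracket"
--
--     # Importance categorization
--     importance = "Regular"
--     if any(keyword in stage_lower for keyword in ["final", "championship", "grand final"]):
--         importance = "Championship"
--     elif any(keyword in stage_lower for keyword in ["semi", "quarter"]):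
--         importance = "Elimination"
--     elif any(keyword in stage_lower for keyword in ["playoff", "bracket"]):
--         importance = "Playoff"
--     elif any(keyword in stage_lower for keyword in ["group", "swiss", "round"]):
--         importance = "Group"
--     elif any(keyword in stage_lower for keyword in ["qualifier"]):
--         importance = "Qualifier"
--
--     return {
--         "phase": phase,
--         "importance": importance
--     }
-- ===== SOURCE B (Python) =====
-- _KEYWORDS = ("group", "swiss", "playoff", "bracket", "final", "semi",
--              "quarter", "round", "qualifier", "upper", "lower", "championship")
--
--
-- def categorize_match_stage(bracket_stage: str):
--     if not bracket_stage:
--         return {"phase": "Unknown", "importance": "Unknown"}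
--     s = bracket_stage.lower()
--     # One sweep over the positions of s: collect every keyword that starts
--     # somewhere in s.  ("grand final" is omitted: it contains "final", so it
--     # can never change the Championship test.)
--     found = set()
--     for i in range(len(s)):
--         for k in _KEYWORDS:
--             if s.startswith(k, i):
--                 found.add(k)
--     phase = "Unknown"
--     if "group" in found or "swiss" in found:
--         phase = "Group Stage"
--     elif "playoff" in found or "bracket" in found:
--         phase = "Playoffs"
--     elif "final" in found:
--         phase = "Finals"
--     elif "semi" in found:
--         phase = "Semifinals"
--     elif "quarter" in found:
--         phase = "Quarterfinals"
--     elif "round" in found: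
--         phase = "Round Robin"
--     elif "qualifier" in found:
--         phase = "Qualifier"
--     elif "upper" in found:
--         phase = "Upper Bracket"
--     elif "lower" in found:
--         phase = "Lower Bracket"
--     importance = "Regular"
--     if "final" in found or "championship" in found:
--         importance = "Championship"
--     elif "semi" in found or "quarter" in found:
--         importance = "Elimination"
--     elif "playoff" in found or "bracket" in found:
--         importance = "Playoff"
--     elif "group" in found or "swiss" in found or "round" in found:
--         importance = "Group"
--     elif "qualifier" in found:
--         importance = "Qualifier"
--     return {"phase": phase, "importance": importance}
-- ===== Notes on version B (the rewrite author's own statement) =====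
-- stated objective: alternative
-- what changed: Instead of ~20 independent substring scans, B makes one left-to-right sweep over the lowered string's positions, collecting into a set every keyword that starts at some position (dropping the redundant 'grand final', which contains 'final'), and then classifies phase and importance by set membership.
import Mathlib
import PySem

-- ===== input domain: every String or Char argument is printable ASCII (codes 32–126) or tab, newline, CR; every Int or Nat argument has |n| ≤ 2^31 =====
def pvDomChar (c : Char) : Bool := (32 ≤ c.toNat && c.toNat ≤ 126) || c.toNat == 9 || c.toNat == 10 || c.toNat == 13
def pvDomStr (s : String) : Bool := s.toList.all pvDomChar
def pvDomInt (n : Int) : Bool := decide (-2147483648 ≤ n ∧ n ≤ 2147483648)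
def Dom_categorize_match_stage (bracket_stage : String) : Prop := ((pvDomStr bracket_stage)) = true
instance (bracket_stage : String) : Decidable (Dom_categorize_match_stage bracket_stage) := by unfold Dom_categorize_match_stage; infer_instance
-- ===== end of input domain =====

-- ===== PORT A =====

-- B replaces A's many independent substring scans by one positional sweep that
-- collects matched keywords into a set, then classifies by set membership
-- (objective: alternative).

def categorize_match_stage (bracket_stage : String) : List (String × String) :=
  if bracket_stage == "" then
    [("phase", "Unknown"), ("importance", "Unknown")]
  else
    let stage_lower := PySem.Str.lower bracket_stage
    let phase : String :=
      if PySem.Str.isIn "group" stage_lower || PySem.Str.isIn "swiss" stage_lower then "Group Stage"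
      else if PySem.Str.isIn "playoff" stage_lower || PySem.Str.isIn "bracket" stage_lower then "Playoffs"
      else if PySem.Str.isIn "final" stage_lower then "Finals"
      else if PySem.Str.isIn "semi" stage_lower then "Semifinals"
      else if PySem.Str.isIn "quarter" stage_lower then "Quarterfinals"
      else if PySem.Str.isIn "round" stage_lower then "Round Robin"
      else if PySem.Str.isIn "qualifier" stage_lower then "Qualifier"
      else if PySem.Str.isIn "upper" stage_lower then "Upper Bracket"
      else if PySem.Str.isIn "lower" stage_lower then "Lower Bracket"
      else "Unknown"
    let importance : String :=
      if ["final", "championship", "grand final"].any (fun k => PySem.Str.isIn k stage_lower) then "Championship"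
      else if ["semi", "quarter"].any (fun k => PySem.Str.isIn k stage_lower) then "Elimination"
      else if ["playoff", "bracket"].any (fun k => PySem.Str.isIn k stage_lower) then "Playoff"
      else if ["group", "swiss", "round"].any (fun k => PySem.Str.isIn k stage_lower) then "Group"
      else if ["qualifier"].any (fun k => PySem.Str.isIn k stage_lower) then "Qualifier"
      else "Regular"
    [("phase", phase), ("importance", importance)]

-- ===== PORT B =====
def pvKeywords : List String :=
  ["group", "swiss", "playoff", "bracket", "final", "semi",
   "quarter", "round", "qualifier", "upper", "lower", "championship"]

def categorize_match_stage_alt (bracket_stage : String) : List (String × String) :=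
  if bracket_stage == "" then
    [("phase", "Unknown"), ("importance", "Unknown")]
  else
    let s := PySem.Str.lower bracket_stage
    -- for i in range(len(s)): for k in _KEYWORDS: if s.startswith(k, i): found.add(k)
    -- (s.startswith(k, i) ported exactly as Chars.startswith on the i-th suffix of s.toList)
    let cs := s.toList
    let found : PySem.Set String :=
      (PySem.List.pyRange 0 (PySem.Str.len s) 1).foldl
        (fun fs i => pvKeywords.foldl
          (fun fs k => if PySem.Chars.startswith (cs.drop i.toNat) k.toList then PySem.Set.add fs k else fs)
          fs)
        PySem.Set.empty
    let phase : String :=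
      if PySem.Set.contains found "group" || PySem.Set.contains found "swiss" then "Group Stage"
      else if PySem.Set.contains found "playoff" || PySem.Set.contains found "bracket" then "Playoffs"
      else if PySem.Set.contains found "final" then "Finals"
      else if PySem.Set.contains found "semi" then "Semifinals"
      else if PySem.Set.contains found "quarter" then "Quarterfinals"
      else if PySem.Set.contains found "round" then "Round Robin"
      else if PySem.Set.contains found "qualifier" then "Qualifier"
      else if PySem.Set.contains found "upper" then "Upper Bracket"
      else if PySem.Set.contains found "lower" then "Lower Bracket"
      else "Unknown"
    let importance : String :=
      if PySem.Set.contains found "final" || PySem.Set.contains found "championship" then "Championship"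
      else if PySem.Set.contains found "semi" || PySem.Set.contains found "quarter" then "Elimination"
      else if PySem.Set.contains found "playoff" || PySem.Set.contains found "bracket" then "Playoff"
      else if PySem.Set.contains found "group" || PySem.Set.contains found "swiss" || PySem.Set.contains found "round" then "Group"
      else if PySem.Set.contains found "qualifier" then "Qualifier"
      else "Regular"
    [("phase", phase), ("importance", importance)]

-- ===== PRECONDITION & SPEC =====
def Spec_categorize_match_stage (bracket_stage : String) (out : List (String × String)) : Prop := out = categorize_match_stage_alt bracket_stage
instance (bracket_stage : String) (out : List (String × String)) : Decidable (Spec_categorize_match_stage bracket_stage out) := by unfold Spec_categorize_match_stage; infer_instance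

-- ===== CLAIM =====
def Claim_equal_categorize_match_stage : Prop := ∀ (bracket_stage : String), Dom_categorize_match_stage bracket_stage → Spec_categorize_match_stage bracket_stage (categorize_match_stage bracket_stage)

-- ===== LEMMAS AND PROOFS =====

-- inner keyword loop: k lands in the accumulator iff it was there or it starts the suffix ds
theorem pvMem_inner (ds : List Char) (ks : List String) (fs : PySem.Set String) (k : String) :
    k ∈ ks.foldl
        (fun fs k' => if PySem.Chars.startswith ds k'.toList then PySem.Set.add fs k' else fs)
        fs
      ↔ k ∈ fs ∨ (k ∈ ks ∧ PySem.Chars.startswith ds k.toList = true) := by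
  induction ks generalizing fs with
  | nil => simp
  | cons hd tl ih =>
      simp only [List.foldl_cons, ih]
      by_cases h : PySem.Chars.startswith ds hd.toList = true
      · simp only [h, if_true, PySem.Set.mem_add, List.mem_cons]
        constructor
        · rintro ((hf | rfl) | hrest)
          · exact Or.inl hf
          · exact Or.inr ⟨Or.inl rfl, h⟩
          · exact Or.inr ⟨Or.inr hrest.1, hrest.2⟩
        · rintro (hf | ⟨(rfl | hm), hc⟩)
          · exact Or.inl (Or.inl hf)
          · exact Or.inl (Or.inr rfl)
          · exact Or.inr ⟨hm, hc⟩
      · simp only [h, List.mem_cons]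
        constructor
        · rintro (hf | hrest)
          · exact Or.inl hf
          · exact Or.inr ⟨Or.inr hrest.1, hrest.2⟩
        · rintro (hf | ⟨(rfl | hm), hc⟩)
          · exact Or.inl hf
          · exact absurd hc h
          · exact Or.inr ⟨hm, hc⟩

-- outer position loop over an arbitrary index list
theorem pvMem_sweep (cs : List Char) (rng : List Int) (fs : PySem.Set String) (k : String) :
    k ∈ rng.foldl
        (fun fs i => pvKeywords.foldl
          (fun fs k' => if PySem.Chars.startswith (cs.drop i.toNat) k'.toList then PySem.Set.add fs k' else fs)
          fs)
        fs
      ↔ k ∈ fs ∨ (k ∈ pvKeywords ∧ ∃ i ∈ rng, PySem.Chars.startswith (cs.drop i.toNat) k.toList = true) := by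
  induction rng generalizing fs with
  | nil => simp
  | cons hd tl ih =>
      simp only [List.foldl_cons, ih, pvMem_inner, List.mem_cons]
      constructor
      · rintro ((hf | ⟨hm, hc⟩) | ⟨hm, i, hi, hc⟩)
        · exact Or.inl hf
        · exact Or.inr ⟨hm, hd, Or.inl rfl, hc⟩
        · exact Or.inr ⟨hm, i, Or.inr hi, hc⟩
      · rintro (hf | ⟨hm, i, (rfl | hi), hc⟩)
        · exact Or.inl (Or.inl hf)
        · exact Or.inl (Or.inr ⟨hm, hc⟩)
        · exact Or.inr ⟨hm, i, hi, hc⟩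

-- the sweep's set contains k exactly when k occurs as a substring (k a nonempty keyword)
theorem pvContains_found (t : String) (k : String) (hmem : k ∈ pvKeywords) (hne : k.toList ≠ []) :
    PySem.Set.contains
      ((PySem.List.pyRange 0 (PySem.Str.len t) 1).foldl
        (fun fs i => pvKeywords.foldl
          (fun fs k' => if PySem.Chars.startswith (t.toList.drop i.toNat) k'.toList then PySem.Set.add fs k' else fs)
          fs)
        PySem.Set.empty) k
      = PySem.Str.isIn k t := by
  rw [Bool.eq_iff_iff, PySem.Set.contains_iff, pvMem_sweep]
  constructor
  · rintro (hf | ⟨_, i, _, hstart⟩)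
    · simp [PySem.Set.empty] at hf
    · rw [PySem.Chars.startswith_iff] at hstart
      have h1 : PySem.Chars.isIn k.toList t.toList = true :=
        (PySem.Chars.exists_prefix_drop_iff_isIn _ _).mp ⟨i.toNat, hstart⟩
      simpa [PySem.Str.isIn_eq] using h1
  · intro hIn
    refine Or.inr ⟨hmem, ?_⟩
    have h1 : PySem.Chars.isIn k.toList t.toList = true := by
      simpa [PySem.Str.isIn_eq] using hIn
    obtain ⟨j, hj⟩ := (PySem.Chars.exists_prefix_drop_iff_isIn _ _).mpr h1
    have hjlt : j < t.toList.length := by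
      rcases Nat.lt_or_ge j t.toList.length with h' | h'
      · exact h'
      · rw [List.drop_eq_nil_of_le h'] at hj
        exact absurd (List.prefix_nil.mp hj) hne
    refine ⟨(j : Int), ?_, ?_⟩
    · rw [PySem.List.mem_pyRange_one]
      refine ⟨Int.natCast_nonneg j, ?_⟩
      simp only [PySem.Str.len_eq]
      exact_mod_cast hjlt
    · rw [PySem.Chars.startswith_iff]
      simpa using hj

-- "grand final" contains "final", so it never changes the Championship test
theorem pvGrand_implies_final (t : String) (h : PySem.Str.isIn "grand final" t = true) :
    PySem.Str.isIn "final" t = true := by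
  rw [PySem.Str.isIn_iff_infix] at h ⊢
  exact List.IsInfix.trans (by decide) h

theorem pvChamp_eq (t : String) :
    (PySem.Str.isIn "final" t || (PySem.Str.isIn "championship" t || PySem.Str.isIn "grand final" t))
      = (PySem.Str.isIn "final" t || PySem.Str.isIn "championship" t) := by
  cases hg : PySem.Str.isIn "grand final" t
  · simp only [Bool.or_false]
  · rw [pvGrand_implies_final t hg]
    simp only [Bool.true_or]

-- ===== VERDICT =====
theorem categorize_match_stage_spec : Claim_equal_categorize_match_stage := by
  intro bracket_stage _
  unfold Spec_categorize_match_stage categorize_match_stage categorize_match_stage_alt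
  by_cases h : bracket_stage == ""
  · simp [h]
  · simp only [h, Bool.false_eq_true, if_false]
    rw [pvContains_found _ "group" (by decide) (by decide),
        pvContains_found _ "swiss" (by decide) (by decide),
        pvContains_found _ "playoff" (by decide) (by decide),
        pvContains_found _ "bracket" (by decide) (by decide),
        pvContains_found _ "final" (by decide) (by decide),
        pvContains_found _ "semi" (by decide) (by decide),
        pvContains_found _ "quarter" (by decide) (by decide),
        pvContains_found _ "round" (by decide) (by decide),
        pvContains_found _ "qualifier" (by decide) (by decide),
        pvContains_found _ "upper" (by decide) (by decide),
        pvContains_found _ "lower" (by decide) (by decide),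
        pvContains_found _ "championship" (by decide) (by decide)]
    simp only [List.any_cons, List.any_nil, Bool.or_false]
    rw [pvChamp_eq]
    simp only [Bool.or_assoc]
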